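-- pv_equiv track=rewrite | github.com/pypi-data/pypi-mirror-402 | packages/canvas-eject/canvas_eject-0.1.1-py3-none-any.whl/canvas_eject/create_project.py | validate_project_name
-- ===== SOURCE A (Python) =====
-- def validate_project_name(name: str) -> bool:
--     """Validate project name according to npm package naming rules."""
--     if not name:
--         return False
--
--     # Basic npm package name validation
--     if len(name) > 214:
--         return False
--
--     # Must not start with . or _
--     if name.startswith('.') or name.startswith('_'):
--         return False
--
--     # Must not contain uppercase letters
--     if any(c.isupper() for c in name):
--         return False
--
--     # Must not contain spaces or special characters except - and _
--     import string
--     allowed_chars = string.ascii_lowercase + string.digits + '-_'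
--     if not all(c in allowed_chars for c in name):
--         return False
--
--     return True
-- ===== SOURCE B (Python) =====
-- import re
--
-- _NAME_RE = re.compile(r'^[a-z0-9-][a-z0-9_-]{0,213}$')
--
-- def validate_project_name(name: str) -> bool:
--     """Validate project name according to npm package naming rules."""
--     return bool(_NAME_RE.fullmatch(name))
-- ===== Notes on version B (the rewrite author's own statement) =====
-- stated objective: idiomatic
-- what changed: Replaced A's chain of five guard checks (emptiness, length, startswith, any-uppercase scan, allowed-character scan) by a single anchored compiled regular expression fullmatch of r'^[a-z0-9-][a-z0-9_-]{0,213}$'.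
import Mathlib
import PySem

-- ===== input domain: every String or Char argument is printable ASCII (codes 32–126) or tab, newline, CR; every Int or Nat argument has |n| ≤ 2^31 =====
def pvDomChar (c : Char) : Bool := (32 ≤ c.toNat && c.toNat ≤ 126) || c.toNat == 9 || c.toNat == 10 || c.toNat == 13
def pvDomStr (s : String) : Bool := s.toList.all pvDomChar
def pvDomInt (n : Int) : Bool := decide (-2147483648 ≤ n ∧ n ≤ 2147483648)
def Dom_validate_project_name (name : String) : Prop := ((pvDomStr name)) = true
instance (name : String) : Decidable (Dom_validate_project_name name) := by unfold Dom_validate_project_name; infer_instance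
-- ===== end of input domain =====

-- B replaces A's chain of guard checks by a single anchored regex fullmatch
-- (^[a-z0-9-][a-z0-9_-]{0,213}$); same return value on every input (objective: idiomatic).

-- ===== PORT A =====
-- allowed_chars = string.ascii_lowercase + string.digits + '-_'
def pvAllowedChars : List Char :=
  ['a','b','c','d','e','f','g','h','i','j','k','l','m','n','o','p','q','r','s','t','u','v','w','x','y','z',
   '0','1','2','3','4','5','6','7','8','9','-','_']

def validate_project_name (name : String) : Bool :=
  let cs := name.toList
  if cs.isEmpty then false                                                -- if not name
  else if cs.length > 214 then false                                      -- if len(name) > 214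
  else if PySem.Chars.startswith cs ['.'] || PySem.Chars.startswith cs ['_'] then false
  else if cs.any PySem.Chars.isupper then false                           -- any(c.isupper() for c in name)
  else if !(cs.all (fun c => decide (c ∈ pvAllowedChars))) then false     -- all(c in allowed_chars ...)
  else true

-- ===== PORT B =====
-- character classes of the regex r'^[a-z0-9-][a-z0-9_-]{0,213}$'
def pvFirstClass (c : Char) : Bool :=
  (decide ('a' ≤ c) && decide (c ≤ 'z')) || (decide ('0' ≤ c) && decide (c ≤ '9')) || c == '-'
def pvRestClass (c : Char) : Bool := pvFirstClass c || c == '_'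

-- fullmatch of the anchored pattern: one leading-class char, then 0..213 tail-class chars
def validate_project_name_alt (name : String) : Bool :=
  match name.toList with
  | [] => false
  | c :: rest => pvFirstClass c && decide (rest.length ≤ 213) && rest.all pvRestClass

-- ===== PRECONDITION & SPEC =====
def Spec_validate_project_name (name : String) (out : Bool) : Prop := out = validate_project_name_alt name
instance (name : String) (out : Bool) : Decidable (Spec_validate_project_name name out) := by unfold Spec_validate_project_name; infer_instance

-- ===== CLAIM (what is proved, stated in full; the proofs are below) =====
def Claim_equal_validate_project_name : Prop := ∀ (name : String), Dom_validate_project_name name → Spec_validate_project_name name (validate_project_name name)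

-- ===== LEMMAS AND PROOFS =====

-- a char passes the regex tail class iff it is allowed and not uppercase
theorem pv_rest_char (c : Char) :
    pvRestClass c = (!PySem.Chars.isupper c && decide (c ∈ pvAllowedChars)) := by
  refine Bool.eq_iff_iff.mpr ?_
  simp [pvAllowedChars, PySem.Chars.isupper, pvRestClass, pvFirstClass, Char.le_def, Char.ext_iff,
        UInt32.le_iff_toNat_le, UInt32.ext_iff]
  omega

-- a char passes the regex leading class iff it is allowed, not uppercase, and not '.' or '_'
theorem pv_first_char (c : Char) :
    pvFirstClass c = ((!(c == '.') && !(c == '_')) && !PySem.Chars.isupper c && decide (c ∈ pvAllowedChars)) := by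
  refine Bool.eq_iff_iff.mpr ?_
  simp [pvAllowedChars, PySem.Chars.isupper, pvFirstClass, Char.le_def, Char.ext_iff,
        UInt32.le_iff_toNat_le, UInt32.ext_iff]
  omega

theorem pv_ab (name : String) : validate_project_name name = validate_project_name_alt name := by
  simp only [validate_project_name, validate_project_name_alt]
  cases h : name.toList with
  | nil => simp
  | cons c rest =>
    refine Bool.eq_iff_iff.mpr ?_
    simp [PySem.Chars.startswith, List.isPrefixOf, pv_first_char, pv_rest_char, List.all_eq_true,
          List.any_eq_true, Nat.lt_add_one_iff]
    constructor
    · rintro ⟨h1, ⟨h2, h3⟩, ⟨h4, h5⟩, h6, h7⟩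
      exact ⟨⟨⟨⟨⟨fun e => h2 e.symm, fun e => h3 e.symm⟩, h4⟩, h6⟩, h1⟩, fun x hx => ⟨h5 x hx, h7 x hx⟩⟩
    · rintro ⟨⟨⟨⟨⟨h2, h3⟩, h4⟩, h6⟩, h1⟩, hrest⟩
      exact ⟨h1, ⟨fun e => h2 e.symm, fun e => h3 e.symm⟩, ⟨h4, fun x hx => (hrest x hx).1⟩, h6, fun x hx => (hrest x hx).2⟩

-- ===== VERDICT (by name: the statement is the Claim_ definition above) =====
theorem validate_project_name_spec : Claim_equal_validate_project_name := by
  intro name _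
  unfold Spec_validate_project_name
  exact pv_ab name
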